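-- pv_equiv track=rewrite | github.com/BlakeMatthews-dev/AgentTuring | research/project-turing/sketches/turing/detectors/contradiction.py | _claims_opposed
-- ===== SOURCE A (Python) =====
-- def _claims_opposed(a_content: str, b_content: str) -> bool:
--     """Simple content-shape check. High precision, low recall, by design.
--
--     The dispatched execution can run a more sophisticated check. Detection
--     is meant to be cheap enough to run every tick.
--     """
--     a = a_content.lower().strip()
--     b = b_content.lower().strip()
--     if a == b:
--         return False
--     for true_suffix, false_suffix in [(" is true", " is false"), (" holds", " does not hold")]:
--         if a.endswith(true_suffix) and b.endswith(false_suffix):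
--             return a[: -len(true_suffix)] == b[: -len(false_suffix)]
--         if b.endswith(true_suffix) and a.endswith(false_suffix):
--             return b[: -len(true_suffix)] == a[: -len(false_suffix)]
--     if a == f"not {b}" or b == f"not {a}":
--         return True
--     return False
-- ===== SOURCE B (Python) =====
-- _SUFFIXES = [(" is true", 0, True), (" is false", 0, False),
--              (" does not hold", 1, False), (" holds", 1, True)]
--
--
-- def _parse(s):
--     """Classify one claim: (core, family, sign) or (s, None, None)."""
--     for suf, fam, sign in _SUFFIXES:
--         if s.endswith(suf):
--             return s[:len(s) - len(suf)], fam, sign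
--     return s, None, None
--
--
-- def _claims_opposed(a_content: str, b_content: str) -> bool:
--     a = a_content.lower().strip()
--     b = b_content.lower().strip()
--     ca, fa, sa = _parse(a)
--     cb, fb, sb = _parse(b)
--     if fa is not None and fa == fb and sa != sb:
--         return ca == cb
--     return a == "not " + b or b == "not " + a
-- ===== Notes on version B (the rewrite author's own statement) =====
-- stated objective: alternative
-- what changed: Each claim is parsed independently into a (core, family, sign) triple by one suffix scan, and opposition is decided by comparing the two parses (same family, opposite sign, equal cores) before the shared 'not '-prefix fallback, replacing A's joint pairwise loop over (true_suffix, false_suffix) pairs with its early returns and a==b guard.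
import Mathlib
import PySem

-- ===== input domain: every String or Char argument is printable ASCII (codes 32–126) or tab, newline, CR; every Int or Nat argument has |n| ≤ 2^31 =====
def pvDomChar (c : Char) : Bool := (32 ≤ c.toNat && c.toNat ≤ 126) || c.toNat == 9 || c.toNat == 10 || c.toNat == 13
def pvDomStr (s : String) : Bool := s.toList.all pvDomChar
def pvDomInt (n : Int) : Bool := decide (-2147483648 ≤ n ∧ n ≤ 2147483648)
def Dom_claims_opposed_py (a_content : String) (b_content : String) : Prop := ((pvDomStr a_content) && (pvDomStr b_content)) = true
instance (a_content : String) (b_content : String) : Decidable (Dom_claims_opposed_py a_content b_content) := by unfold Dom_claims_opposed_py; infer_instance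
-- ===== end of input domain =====

-- B replaces A's joint pairwise suffix loop by parsing EACH claim independently into
-- (core, family, sign) and comparing the two parses (objective: alternative decomposition).

-- ===== PORT A =====
-- the for-loop over [(true_suffix, false_suffix)] with its early returns
def pvLoopA (a b : List Char) : List (List Char × List Char) → Option Bool
  | [] => none
  | (ts, fs) :: rest =>
    if PySem.Chars.endswith a ts && PySem.Chars.endswith b fs then
      some (PySem.List.slice a none (some (-(ts.length : Int))) ==
            PySem.List.slice b none (some (-(fs.length : Int))))
    else if PySem.Chars.endswith b ts && PySem.Chars.endswith a fs then
      some (PySem.List.slice b none (some (-(ts.length : Int))) ==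
            PySem.List.slice a none (some (-(fs.length : Int))))
    else pvLoopA a b rest

def pvCoreA (a b : List Char) : Bool :=
  if a == b then false
  else
    match pvLoopA a b [(" is true".toList, " is false".toList),
                       (" holds".toList, " does not hold".toList)] with
    | some r => r
    | none =>
      if a == "not ".toList ++ b || b == "not ".toList ++ a then true else false

def claims_opposed_py (a_content : String) (b_content : String) : Bool :=
  pvCoreA (PySem.Chars.strip (PySem.Chars.lower a_content.toList))
          (PySem.Chars.strip (PySem.Chars.lower b_content.toList))

-- ===== PORT B =====
def pvSuffixes : List (List Char × Nat × Bool) :=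
  [(" is true".toList, 0, true), (" is false".toList, 0, false),
   (" does not hold".toList, 1, false), (" holds".toList, 1, true)]

-- _parse: classify one claim as (core, some (family, sign)) or (s, none)
def pvParseGo (s : List Char) : List (List Char × Nat × Bool) → List Char × Option (Nat × Bool)
  | [] => (s, none)
  | (suf, fam, sign) :: rest =>
    if PySem.Chars.endswith s suf then (s.take (s.length - suf.length), some (fam, sign))
    else pvParseGo s rest

def pvCoreB (a b : List Char) : Bool :=
  let pa := pvParseGo a pvSuffixes
  let pb := pvParseGo b pvSuffixes
  match pa.2, pb.2 with
  | some (fa, sa), some (fb, sb) =>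
    if fa == fb && sa != sb then pa.1 == pb.1
    else a == "not ".toList ++ b || b == "not ".toList ++ a
  | _, _ => a == "not ".toList ++ b || b == "not ".toList ++ a

def claims_opposed_py_alt (a_content : String) (b_content : String) : Bool :=
  pvCoreB (PySem.Chars.strip (PySem.Chars.lower a_content.toList))
          (PySem.Chars.strip (PySem.Chars.lower b_content.toList))

-- ===== PRECONDITION & SPEC =====
def Spec_claims_opposed_py (a_content : String) (b_content : String) (out : Bool) : Prop := out = claims_opposed_py_alt a_content b_content
instance (a_content : String) (b_content : String) (out : Bool) : Decidable (Spec_claims_opposed_py a_content b_content out) := by unfold Spec_claims_opposed_py; infer_instance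

-- ===== CLAIM (what is proved, stated in full; the proofs are below) =====
def Claim_equal_claims_opposed_py : Prop := ∀ (a_content : String) (b_content : String), Dom_claims_opposed_py a_content b_content → Spec_claims_opposed_py a_content b_content (claims_opposed_py a_content b_content)

-- ===== LEMMAS AND PROOFS =====

-- two of the four suffixes can never end the same string unless one is a suffix of the other
lemma pv_excl {x s1 s2 : List Char} (h1 : PySem.Chars.endswith x s1 = true)
    (hn : ¬ (s1 <:+ s2 ∨ s2 <:+ s1)) : PySem.Chars.endswith x s2 = false := by
  by_cases h2 : PySem.Chars.endswith x s2 = true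
  · rw [PySem.Chars.endswith_iff] at h1 h2
    exact absurd (List.suffix_or_suffix_of_suffix h1 h2) hn
  · simpa using h2

lemma pv_not_self (x : List Char) : x ≠ 'n' :: 'o' :: 't' :: ' ' :: x := by
  intro h
  have := congrArg List.length h
  simp at this; omega

lemma pv_slice8 (s : List Char) : PySem.List.slice s none (some (-8)) = s.take (s.length - 8) :=
  PySem.List.slice_to_neg_ofNat s 8 (by norm_num)
lemma pv_slice9 (s : List Char) : PySem.List.slice s none (some (-9)) = s.take (s.length - 9) :=
  PySem.List.slice_to_neg_ofNat s 9 (by norm_num)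
lemma pv_slice6 (s : List Char) : PySem.List.slice s none (some (-6)) = s.take (s.length - 6) :=
  PySem.List.slice_to_neg_ofNat s 6 (by norm_num)
lemma pv_slice14 (s : List Char) : PySem.List.slice s none (some (-14)) = s.take (s.length - 14) :=
  PySem.List.slice_to_neg_ofNat s 14 (by norm_num)

-- every claim string matches at most one of the four suffixes
lemma pv_classify (s : List Char) :
    (PySem.Chars.endswith s [' ', 'i', 's', ' ', 't', 'r', 'u', 'e'] = true ∧
     PySem.Chars.endswith s [' ', 'i', 's', ' ', 'f', 'a', 'l', 's', 'e'] = false ∧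
     PySem.Chars.endswith s [' ', 'h', 'o', 'l', 'd', 's'] = false ∧
     PySem.Chars.endswith s [' ', 'd', 'o', 'e', 's', ' ', 'n', 'o', 't', ' ', 'h', 'o', 'l', 'd'] = false) ∨
    (PySem.Chars.endswith s [' ', 'i', 's', ' ', 't', 'r', 'u', 'e'] = false ∧
     PySem.Chars.endswith s [' ', 'i', 's', ' ', 'f', 'a', 'l', 's', 'e'] = true ∧
     PySem.Chars.endswith s [' ', 'h', 'o', 'l', 'd', 's'] = false ∧
     PySem.Chars.endswith s [' ', 'd', 'o', 'e', 's', ' ', 'n', 'o', 't', ' ', 'h', 'o', 'l', 'd'] = false) ∨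
    (PySem.Chars.endswith s [' ', 'i', 's', ' ', 't', 'r', 'u', 'e'] = false ∧
     PySem.Chars.endswith s [' ', 'i', 's', ' ', 'f', 'a', 'l', 's', 'e'] = false ∧
     PySem.Chars.endswith s [' ', 'h', 'o', 'l', 'd', 's'] = true ∧
     PySem.Chars.endswith s [' ', 'd', 'o', 'e', 's', ' ', 'n', 'o', 't', ' ', 'h', 'o', 'l', 'd'] = false) ∨
    (PySem.Chars.endswith s [' ', 'i', 's', ' ', 't', 'r', 'u', 'e'] = false ∧
     PySem.Chars.endswith s [' ', 'i', 's', ' ', 'f', 'a', 'l', 's', 'e'] = false ∧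
     PySem.Chars.endswith s [' ', 'h', 'o', 'l', 'd', 's'] = false ∧
     PySem.Chars.endswith s [' ', 'd', 'o', 'e', 's', ' ', 'n', 'o', 't', ' ', 'h', 'o', 'l', 'd'] = true) ∨
    (PySem.Chars.endswith s [' ', 'i', 's', ' ', 't', 'r', 'u', 'e'] = false ∧
     PySem.Chars.endswith s [' ', 'i', 's', ' ', 'f', 'a', 'l', 's', 'e'] = false ∧
     PySem.Chars.endswith s [' ', 'h', 'o', 'l', 'd', 's'] = false ∧
     PySem.Chars.endswith s [' ', 'd', 'o', 'e', 's', ' ', 'n', 'o', 't', ' ', 'h', 'o', 'l', 'd'] = false) := by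
  by_cases ht : PySem.Chars.endswith s [' ', 'i', 's', ' ', 't', 'r', 'u', 'e'] = true
  · exact Or.inl ⟨ht, pv_excl ht (by decide), pv_excl ht (by decide), pv_excl ht (by decide)⟩
  by_cases hf : PySem.Chars.endswith s [' ', 'i', 's', ' ', 'f', 'a', 'l', 's', 'e'] = true
  · exact Or.inr (Or.inl ⟨pv_excl hf (by decide), hf, pv_excl hf (by decide), pv_excl hf (by decide)⟩)
  by_cases hh : PySem.Chars.endswith s [' ', 'h', 'o', 'l', 'd', 's'] = true
  · exact Or.inr (Or.inr (Or.inl ⟨pv_excl hh (by decide), pv_excl hh (by decide), hh, pv_excl hh (by decide)⟩))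
  by_cases hd : PySem.Chars.endswith s [' ', 'd', 'o', 'e', 's', ' ', 'n', 'o', 't', ' ', 'h', 'o', 'l', 'd'] = true
  · exact Or.inr (Or.inr (Or.inr (Or.inl ⟨pv_excl hd (by decide), pv_excl hd (by decide), pv_excl hd (by decide), hd⟩)))
  · exact Or.inr (Or.inr (Or.inr (Or.inr ⟨by simpa using ht, by simpa using hf, by simpa using hh, by simpa using hd⟩)))

theorem pvCore_eq (x y : List Char) : pvCoreA x y = pvCoreB x y := by
  by_cases hxy : x = y
  · subst hxy
    simp only [pvCoreA, pvCoreB, beq_self_eq_true, if_true]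
    cases h : (pvParseGo x pvSuffixes).2 with
    | none => simp [pv_not_self x]
    | some p =>
      obtain ⟨f, s⟩ := p
      simp [pv_not_self x]
  · rcases pv_classify x with ⟨h1,h2,h3,h4⟩|⟨h1,h2,h3,h4⟩|⟨h1,h2,h3,h4⟩|⟨h1,h2,h3,h4⟩|⟨h1,h2,h3,h4⟩ <;>
    rcases pv_classify y with ⟨g1,g2,g3,g4⟩|⟨g1,g2,g3,g4⟩|⟨g1,g2,g3,g4⟩|⟨g1,g2,g3,g4⟩|⟨g1,g2,g3,g4⟩ <;>
    simp [pvCoreA, pvCoreB, pvLoopA, pvParseGo, pvSuffixes, h1, h2, h3, h4, g1, g2, g3, g4,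
          hxy, pv_slice8, pv_slice9, pv_slice6, pv_slice14, Bool.beq_comm, beq_eq_decide]

-- ===== VERDICT (by name: the statement is the Claim_ definition above) =====
theorem claims_opposed_py_spec : Claim_equal_claims_opposed_py := by
  intro a b _
  unfold Spec_claims_opposed_py claims_opposed_py claims_opposed_py_alt
  exact pvCore_eq _ _
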